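-- pv_equiv track=rewrite | github.com/lqminhhh/bill-buddy | backend/utils/calculations.py | simplify_settlements
-- ===== SOURCE A (Python) =====
-- def simplify_settlements(net_balances):
--     """
--     Convert net balances into a minimal-looking set of settlement transfers.
--
--     Input format:
--     {
--         member_id: net_balance_cents
--     }
--
--     Output format:
--     [
--         {"from_member_id": 2, "to_member_id": 1, "amount_cents": 1250}
--     ]
--     """
--     creditors = []
--     debtors = []
--
--     for member_id, balance_cents in sorted(net_balances.items()):
--         if balance_cents > 0:
--             creditors.append({"member_id": member_id, "amount_cents": balance_cents})
--         elif balance_cents < 0: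
--             debtors.append({"member_id": member_id, "amount_cents": -balance_cents})
--
--     settlements = []
--     creditor_index = 0
--     debtor_index = 0
--
--     while debtor_index < len(debtors) and creditor_index < len(creditors):
--         debtor = debtors[debtor_index]
--         creditor = creditors[creditor_index]
--         payment_cents = min(debtor["amount_cents"], creditor["amount_cents"])
--
--         settlements.append(
--             {
--                 "from_member_id": debtor["member_id"],
--                 "to_member_id": creditor["member_id"],
--                 "amount_cents": payment_cents,
--             }
--         )
--
--         debtor["amount_cents"] -= payment_cents
--         creditor["amount_cents"] -= payment_cents
--
--         if debtor["amount_cents"] == 0: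
--             debtor_index += 1
--
--         if creditor["amount_cents"] == 0:
--             creditor_index += 1
--
--     return settlements
-- ===== SOURCE B (Python) =====
-- def simplify_settlements(net_balances):
--     """Prefix-sum sweep: instead of greedily pairing and mutating remaining
--     amounts, compute cumulative boundaries of debtor and creditor intervals,
--     take the sorted set of cut points up to the common total, and look up the
--     owner of each segment by binary search on the cumulative sums."""
--     items = sorted(net_balances.items())
--     debtors = [(m, -b) for m, b in items if b < 0]
--     creditors = [(m, b) for m, b in items if b > 0]
--
--     def cum(pairs):
--         total, out = 0, []
--         for _, a in pairs:
--             total += a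
--             out.append(total)
--         return out
--
--     dcum = cum(debtors)
--     ccum = cum(creditors)
--     total = min(dcum[-1], ccum[-1]) if dcum and ccum else 0
--     cuts = sorted({x for x in dcum + ccum if x <= total})
--
--     def rank(cs, x):
--         # number of elements of the sorted list cs that are <= x
--         lo, hi = 0, len(cs)
--         while lo < hi:
--             mid = (lo + hi) // 2
--             if cs[mid] <= x:
--                 lo = mid + 1
--             else:
--                 hi = mid
--         return lo
--
--     settlements = []
--     prev = 0
--     for cut in cuts:
--         settlements.append({
--             "from_member_id": debtors[rank(dcum, prev)][0],
--             "to_member_id": creditors[rank(ccum, prev)][0],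
--             "amount_cents": cut - prev,
--         })
--         prev = cut
--     return settlements
-- ===== Notes on version B (the rewrite author's own statement) =====
-- stated objective: alternative
-- what changed: Replaces the greedy two-pointer loop that mutates remaining amounts by a prefix-sum sweep: build cumulative debtor/creditor boundaries, take the sorted set of cut points up to the common total, and find each segment's debtor and creditor by binary search on the cumulative sums.
import Mathlib
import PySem

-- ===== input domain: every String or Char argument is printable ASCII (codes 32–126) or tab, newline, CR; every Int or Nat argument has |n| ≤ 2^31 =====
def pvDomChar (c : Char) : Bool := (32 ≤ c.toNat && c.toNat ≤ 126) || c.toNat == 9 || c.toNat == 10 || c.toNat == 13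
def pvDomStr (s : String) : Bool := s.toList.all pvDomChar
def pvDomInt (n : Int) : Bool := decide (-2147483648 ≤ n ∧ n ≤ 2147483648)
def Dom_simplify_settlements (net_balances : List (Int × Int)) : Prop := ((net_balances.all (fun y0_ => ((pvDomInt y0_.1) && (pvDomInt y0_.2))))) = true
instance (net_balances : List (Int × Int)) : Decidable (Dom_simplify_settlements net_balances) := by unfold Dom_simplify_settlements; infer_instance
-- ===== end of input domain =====

-- B replaces A's greedy two-pointer matching by a prefix-sum sweep (cut points + binary search); return values agree everywhere (neither program mutates its argument).

-- ===== PORT A =====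

-- one pass splitting the sorted items into creditors and debtors (A's for-loop)
def pvSplitA : List (Int × Int) → List (Int × Int) × List (Int × Int)
  | [] => ([], [])
  | (m, b) :: rest =>
    let r := pvSplitA rest
    if b > 0 then ((m, b) :: r.1, r.2)
    else if b < 0 then (r.1, (m, -b) :: r.2)
    else r

-- A's two-pointer while loop; indices become list suffixes, the head carries the current remaining amount
def pvSettleA : List (Int × Int) → List (Int × Int) → List (List (String × Int))
  | (d, da) :: ds, (c, ca) :: cs =>
    let p := min da ca
    let s := [("from_member_id", d), ("to_member_id", c), ("amount_cents", p)]
    let ds' := if da - p = 0 then ds else (d, da - p) :: ds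
    let cs' := if ca - p = 0 then cs else (c, ca - p) :: cs
    s :: pvSettleA ds' cs'
  | _, _ => []
termination_by ds cs => ds.length + cs.length
decreasing_by
  split_ifs with h1 h2 <;> simp_all [min_def] <;> split_ifs at * <;> omega

def simplify_settlements (net_balances : List (Int × Int)) : List (List (String × Int)) :=
  let cd := pvSplitA (PySem.List.sorted2 (PySem.Dict.ofList net_balances).items Prod.fst Prod.snd false)
  pvSettleA cd.2 cd.1

-- ===== PORT B =====

-- B's helper cum: running prefix sums of the amounts
def pvCumB : List (Int × Int) → Int → List Int
  | [], _ => []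
  | (_, a) :: rest, t => (t + a) :: pvCumB rest (t + a)

-- B's helper rank: hand-written binary search, number of elements of the sorted list ≤ x
-- (indices stay in [0, len], so Nat with getD is exact for Python's cs[mid] and (lo+hi)//2 here)
def pvRankGo (cs : List Int) (x : Int) (lo hi : Nat) : Nat :=
  if lo < hi then
    let mid := (lo + hi) / 2
    if cs.getD mid 0 ≤ x then pvRankGo cs x (mid + 1) hi
    else pvRankGo cs x lo mid
  else lo
termination_by hi - lo
decreasing_by all_goals omega

def pvRank (cs : List Int) (x : Int) : Nat := pvRankGo cs x 0 cs.length

-- B's for-loop over the cut points, prev as accumulator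
-- (debtors[rank(...)][0] is always in range in B, so getD is exact here)
def pvSweepGo (debtors creditors : List (Int × Int)) (dcum ccum : List Int) :
    List Int → Int → List (List (String × Int))
  | [], _ => []
  | cut :: cuts, prev =>
    [("from_member_id", (debtors.getD (pvRank dcum prev) (0, 0)).1),
     ("to_member_id", (creditors.getD (pvRank ccum prev) (0, 0)).1),
     ("amount_cents", cut - prev)] :: pvSweepGo debtors creditors dcum ccum cuts cut

-- Python's `min(dcum[-1], ccum[-1]) if dcum and ccum else 0`
def pvTotal (dcum ccum : List Int) : Int :=
  match dcum.getLast?, ccum.getLast? with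
  | some a, some b => min a b
  | _, _ => 0

-- B's sweep body: cumulative sums, common total, sorted set of cut points, then the segment loop
def pvSweepAll (debtors creditors : List (Int × Int)) : List (List (String × Int)) :=
  let dcum := pvCumB debtors 0
  let ccum := pvCumB creditors 0
  let total := pvTotal dcum ccum
  let cuts := PySem.List.sorted
    (PySem.Set.ofList ((dcum ++ ccum).filter (fun x => decide (x ≤ total)))) (fun x => x)
  pvSweepGo debtors creditors dcum ccum cuts 0

def simplify_settlements_alt (net_balances : List (Int × Int)) : List (List (String × Int)) :=
  let items := PySem.List.sorted2 (PySem.Dict.ofList net_balances).items Prod.fst Prod.snd false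
  pvSweepAll ((items.filter (fun p => decide (p.2 < 0))).map (fun p => (p.1, -p.2)))
    (items.filter (fun p => decide (0 < p.2)))

-- ===== PRECONDITION & SPEC =====
def Spec_simplify_settlements (net_balances : List (Int × Int)) (out : List (List (String × Int))) : Prop := out = simplify_settlements_alt net_balances
instance (net_balances : List (Int × Int)) (out : List (List (String × Int))) : Decidable (Spec_simplify_settlements net_balances out) := by unfold Spec_simplify_settlements; infer_instance

-- ===== CLAIM (what is proved, stated in full; the proofs are below) =====
def Claim_equal_simplify_settlements : Prop := ∀ (net_balances : List (Int × Int)), Dom_simplify_settlements net_balances → Spec_simplify_settlements net_balances (simplify_settlements net_balances)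

-- ===== LEMMAS AND PROOFS =====

theorem pvSplitA_eq (l : List (Int × Int)) :
    pvSplitA l = (l.filter (fun p => decide (0 < p.2)),
                  (l.filter (fun p => decide (p.2 < 0))).map (fun p => (p.1, -p.2))) := by
  induction l with
  | nil => rfl
  | cons x xs ih =>
    obtain ⟨m, b⟩ := x
    simp only [pvSplitA, ih, List.filter_cons]
    by_cases h1 : 0 < b
    · simp [h1, show ¬ b < 0 by omega]
    · by_cases h2 : b < 0 <;> simp [h1, h2]

theorem pvSettleA_nil_right (ds : List (Int × Int)) : pvSettleA ds [] = [] := by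
  cases ds <;> simp [pvSettleA]

theorem pvSettleA_nil_left (cs : List (Int × Int)) : pvSettleA [] cs = [] := by
  cases cs <;> simp [pvSettleA]

-- prefix sums shift with the accumulator
theorem pvCumB_shift (l : List (Int × Int)) : ∀ t : Int, pvCumB l t = (pvCumB l 0).map (· + t) := by
  induction l with
  | nil => intro t; rfl
  | cons x xs ih =>
    obtain ⟨m, a⟩ := x
    intro t
    simp only [pvCumB, zero_add, List.map_cons, ih (t + a), ih a, List.map_map]
    congr 1
    · omega
    · apply List.map_congr_left; intro y _; simp; omega

theorem pvCumB_gt (l : List (Int × Int)) (hpos : ∀ x ∈ l, 0 < x.2) :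
    ∀ t, ∀ y ∈ pvCumB l t, t < y := by
  induction l with
  | nil => intro t y hy; simp [pvCumB] at hy
  | cons x xs ih =>
    obtain ⟨m, a⟩ := x
    intro t y hy
    have ha : 0 < a := hpos (m, a) (by simp)
    simp only [pvCumB, List.mem_cons] at hy
    rcases hy with rfl | hy
    · omega
    · have := ih (fun z hz => hpos z (List.mem_cons_of_mem _ hz)) (t + a) y hy; omega

theorem pvCumB_pairwise (l : List (Int × Int)) (hpos : ∀ x ∈ l, 0 < x.2) :
    ∀ t, (pvCumB l t).Pairwise (· < ·) := by
  induction l with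
  | nil => intro t; simp [pvCumB]
  | cons x xs ih =>
    obtain ⟨m, a⟩ := x
    intro t
    have hpos' : ∀ z ∈ xs, 0 < z.2 := fun z hz => hpos z (List.mem_cons_of_mem _ hz)
    simp only [pvCumB, List.pairwise_cons]
    exact ⟨fun y hy => pvCumB_gt xs hpos' (t + a) y hy, ih hpos' (t + a)⟩

theorem pvCumB_eq_nil_iff (l : List (Int × Int)) (t : Int) : pvCumB l t = [] ↔ l = [] := by
  cases l with
  | nil => simp [pvCumB]
  | cons x xs => obtain ⟨m, a⟩ := x; simp [pvCumB]

theorem pvCumB_getLast (l : List (Int × Int)) (hl : l ≠ []) :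
    ∀ t, (pvCumB l t).getLast? = some (t + (l.map (·.2)).sum) := by
  induction l with
  | nil => simp at hl
  | cons x xs ih =>
    obtain ⟨m, a⟩ := x
    intro t
    by_cases hxs : xs = []
    · subst hxs; simp [pvCumB]
    · have hne : pvCumB xs (t + a) ≠ [] := by rw [ne_eq, pvCumB_eq_nil_iff]; exact hxs
      obtain ⟨y, ys, hys⟩ := List.exists_cons_of_ne_nil hne
      rw [pvCumB, hys, List.getLast?_cons_cons, ← hys, ih hxs]
      simp only [List.map_cons, List.sum_cons, Option.some.injEq]
      omega

-- in a ≤-sorted list the elements ≤ x are exactly the first countP of them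
theorem sorted_le_iff_lt_countP (cs : List Int) (x : Int) (hs : cs.Pairwise (· ≤ ·)) :
    ∀ i (h : i < cs.length), (cs[i] ≤ x ↔ i < cs.countP (fun v => decide (v ≤ x))) := by
  induction cs with
  | nil => intro i h; simp at h
  | cons a l ih =>
    intro i h
    have hs' := (List.pairwise_cons.mp hs).2
    have ha := (List.pairwise_cons.mp hs).1
    cases i with
    | zero =>
      simp only [List.getElem_cons_zero, List.countP_cons]
      constructor
      · intro hax; simp [hax]
      · intro hlt
        by_contra hax
        have h0 : l.countP (fun v => decide (v ≤ x)) = 0 := by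
          rw [List.countP_eq_zero]
          intro y hy
          have := ha y hy
          simp; omega
        simp [hax, h0] at hlt
    | succ j =>
      simp only [List.getElem_cons_succ, List.countP_cons]
      have hj : j < l.length := by simpa using h
      rw [ih hs' j hj]
      by_cases hax : a ≤ x
      · simp [hax]
      · have hjx : ¬ l[j] ≤ x := by
          have := ha l[j] (List.getElem_mem hj); omega
        have h0 : l.countP (fun v => decide (v ≤ x)) ≤ j := by
          by_contra hc
          exact hjx ((ih hs' j hj).mpr (by omega))
        simp [hax]
        omega

-- the binary search computes countP on a sorted list
theorem pvRankGo_eq (cs : List Int) (x : Int) (hs : cs.Pairwise (· ≤ ·)) :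
    ∀ n lo hi, hi - lo ≤ n → hi ≤ cs.length →
      lo ≤ cs.countP (fun v => decide (v ≤ x)) → cs.countP (fun v => decide (v ≤ x)) ≤ hi →
      pvRankGo cs x lo hi = cs.countP (fun v => decide (v ≤ x)) := by
  intro n
  induction n with
  | zero =>
    intro lo hi hn _ h1 h2
    rw [pvRankGo]
    have : ¬ lo < hi := by omega
    simp [this]; omega
  | succ n ih =>
    intro lo hi hn hlen h1 h2
    rw [pvRankGo]
    by_cases hlt : lo < hi
    · simp only [hlt, if_true]
      have hmid : (lo + hi) / 2 < hi ∧ lo ≤ (lo + hi) / 2 := by omega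
      have hmlen : (lo + hi) / 2 < cs.length := by omega
      have hgetD : cs.getD ((lo + hi) / 2) 0 = cs[(lo + hi) / 2] := List.getD_eq_getElem cs 0 hmlen
      by_cases hle : cs.getD ((lo + hi) / 2) 0 ≤ x
      · simp only [hle, if_true]
        have : (lo + hi) / 2 < cs.countP (fun v => decide (v ≤ x)) :=
          (sorted_le_iff_lt_countP cs x hs _ hmlen).mp (by rw [← hgetD]; exact hle)
        exact ih _ _ (by omega) hlen (by omega) h2
      · simp only [hle, if_false]
        have : ¬ ((lo + hi) / 2 < cs.countP (fun v => decide (v ≤ x))) := by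
          intro hc
          exact hle (by rw [hgetD]; exact (sorted_le_iff_lt_countP cs x hs _ hmlen).mpr hc)
        exact ih _ _ (by omega) (by omega) h1 (by omega)
    · simp [hlt]; omega

theorem pvRank_eq (cs : List Int) (x : Int) (hs : cs.Pairwise (· ≤ ·)) :
    pvRank cs x = cs.countP (fun v => decide (v ≤ x)) := by
  have := List.countP_le_length (l := cs) (p := fun v => decide (v ≤ x))
  exact pvRankGo_eq cs x hs cs.length 0 cs.length (by omega) le_rfl (by omega) this

-- getD projections agree when the first components agree
theorem getD_fst_eq (l1 l2 : List (Int × Int)) (h : l1.map Prod.fst = l2.map Prod.fst) (k : Nat) :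
    (l1.getD k (0, 0)).1 = (l2.getD k (0, 0)).1 := by
  induction l1 generalizing l2 k with
  | nil => cases l2 with
    | nil => rfl
    | cons b t => simp at h
  | cons a t ih =>
    cases l2 with
    | nil => simp at h
    | cons b t2 =>
      simp only [List.map_cons, List.cons.injEq] at h
      cases k with
      | zero => simpa using h.1
      | succ j => simpa using ih t2 h.2 j

-- the sorted-set-of-cuts is THE strictly increasing nodup list with the same membership
theorem cuts_char (l : List Int) (ys : List Int) (hys : ys.Pairwise (· < ·))
    (hmem : ∀ y, y ∈ ys ↔ y ∈ l) :
    PySem.List.sorted (PySem.Set.ofList l) (fun x => x) = ys := by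
  apply PySem.List.sorted_eq_of_perm_of_pairwise_lt
  · apply (List.perm_ext_iff_of_nodup (hys.nodup) (PySem.Set.nodup_ofList l)).mpr
    intro y
    rw [hmem, PySem.Set.mem_ofList]
  · exact hys

-- A's loop step, rephrased on the suffix lists (as in the previous file)
theorem pvSettleA_cons_eq (d da c ca : Int) (ds cs : List (Int × Int)) :
    pvSettleA ((d, da) :: ds) ((c, ca) :: cs) =
      [("from_member_id", d), ("to_member_id", c), ("amount_cents", min da ca)] ::
        pvSettleA (if da - min da ca = 0 then ds else (d, da - min da ca) :: ds)
                  (if ca - min da ca = 0 then cs else (c, ca - min da ca) :: cs) := by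
  rw [pvSettleA]

-- positive-amount lists with zero total are empty
theorem sum_pos_eq (l : List (Int × Int)) (hpos : ∀ x ∈ l, 0 < x.2) :
    0 ≤ (l.map (·.2)).sum ∧ ((l.map (·.2)).sum = 0 → l = []) := by
  induction l with
  | nil => simp
  | cons x xs ih =>
    obtain ⟨m, a⟩ := x
    have ha : 0 < a := hpos (m, a) (by simp)
    have := ih (fun z hz => hpos z (List.mem_cons_of_mem _ hz))
    simp only [List.map_cons, List.sum_cons]
    constructor
    · omega
    · intro h; exfalso; omega

-- all elements of a positive-amount prefix-sum list are positive
theorem pvCumB_pos (l : List (Int × Int)) (hpos : ∀ x ∈ l, 0 < x.2) :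
    ∀ y ∈ pvCumB l 0, 0 < y := pvCumB_gt l hpos 0

theorem pvCumB_getLast0 (l : List (Int × Int)) (hl : l ≠ []) :
    (pvCumB l 0).getLast? = some ((l.map (·.2)).sum) := by
  rw [pvCumB_getLast l hl 0, zero_add]

theorem pvTotal_nil_left (x : List Int) : pvTotal [] x = 0 := by
  cases h : x.getLast? <;> simp [pvTotal, h]

theorem pvTotal_nil_right (x : List Int) : pvTotal x [] = 0 := by
  cases h : x.getLast? <;> simp [pvTotal, h]

theorem pvTotal_eq (x y : List Int) (a b : Int) (hx : x.getLast? = some a)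
    (hy : y.getLast? = some b) : pvTotal x y = min a b := by
  simp [pvTotal, hx, hy]

theorem mem_map_add (L : List Int) (p y : Int) : y ∈ L.map (· + p) ↔ y - p ∈ L := by
  constructor
  · intro h
    obtain ⟨z, hz, rfl⟩ := List.mem_map.mp h
    simpa using hz
  · intro h
    exact List.mem_map.mpr ⟨y - p, h, by omega⟩

theorem countP_map_add (L : List Int) (q p : Int) :
    (L.map (· + p)).countP (fun v => decide (v ≤ q + p)) = L.countP (fun v => decide (v ≤ q)) := by
  rw [List.countP_map]
  apply List.countP_congr
  intro a _
  simp only [Function.comp_apply, decide_eq_true_eq]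
  constructor <;> intro <;> omega

theorem min_sub (a b c : Int) : min (a - c) (b - c) = min a b - c := by
  rcases le_total a b with h | h
  · rw [min_eq_left (by omega), min_eq_left h]
  · rw [min_eq_right (by omega), min_eq_right h]

-- one step of the prefix sums: paying p shifts the whole cumulative list by p
theorem cum_step (m a p : Int) (l : List (Int × Int)) :
    pvCumB ((m, a) :: l) 0 =
      if a - p = 0 then p :: (pvCumB l 0).map (· + p)
      else (pvCumB ((m, a - p) :: l) 0).map (· + p) := by
  by_cases h : a - p = 0
  · have ha : a = p := by omega
    subst ha
    rw [if_pos h]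
    simp only [pvCumB]
    rw [pvCumB_shift l (0 + a)]
    simp
  · rw [if_neg h]
    simp only [pvCumB, List.map_cons]
    congr 1
    · omega
    · rw [pvCumB_shift l (0 + a), pvCumB_shift l (0 + (a - p)), List.map_map]
      apply List.map_congr_left
      intro y _
      simp
      omega

theorem rank_zero (l : List (Int × Int)) (hpos : ∀ x ∈ l, 0 < x.2) :
    pvRank (pvCumB l 0) 0 = 0 := by
  rw [pvRank_eq _ _ ((pvCumB_pairwise l hpos 0).imp (fun h => le_of_lt h))]
  rw [List.countP_eq_zero]
  intro y hy
  have := pvCumB_gt l hpos 0 y hy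
  simp
  omega

-- the owner found by binary search, after paying p, on the big vs the reduced list
theorem rank_shift (m a p : Int) (l : List (Int × Int))
    (hpos : ∀ x ∈ (m, a) :: l, 0 < x.2)
    (hposN : ∀ x ∈ (if a - p = 0 then l else (m, a - p) :: l), 0 < x.2) :
    ∀ q : Int, 0 ≤ q →
      (((m, a) :: l).getD (pvRank (pvCumB ((m, a) :: l) 0) (q + p)) (0, 0)).1 =
        ((if a - p = 0 then l else (m, a - p) :: l).getD
          (pvRank (pvCumB (if a - p = 0 then l else (m, a - p) :: l) 0) q) (0, 0)).1 := by
  intro q hq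
  rw [pvRank_eq _ _ ((pvCumB_pairwise _ hpos 0).imp (fun h => le_of_lt h)),
      pvRank_eq _ _ ((pvCumB_pairwise _ hposN 0).imp (fun h => le_of_lt h)),
      cum_step m a p l]
  by_cases h : a - p = 0
  · rw [if_pos h, if_pos h, List.countP_cons]
    have h1 : decide (p ≤ q + p) = true := by
      simp only [decide_eq_true_eq]
      omega
    rw [if_pos h1, countP_map_add, List.getD_cons_succ]
  · rw [if_neg h, if_neg h, countP_map_add]
    apply getD_fst_eq
    simp

-- the tail of the big sweep is the small sweep, shifted by p
theorem sweep_shift (dsB csB ds' cs' : List (Int × Int)) (dcumB ccumB dcum' ccum' : List Int)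
    (p : Int)
    (hD : ∀ q : Int, 0 ≤ q →
      (dsB.getD (pvRank dcumB (q + p)) (0, 0)).1 = (ds'.getD (pvRank dcum' q) (0, 0)).1)
    (hC : ∀ q : Int, 0 ≤ q →
      (csB.getD (pvRank ccumB (q + p)) (0, 0)).1 = (cs'.getD (pvRank ccum' q) (0, 0)).1) :
    ∀ (cuts : List Int), (∀ z ∈ cuts, 0 ≤ z) → ∀ q : Int, 0 ≤ q →
      pvSweepGo dsB csB dcumB ccumB (cuts.map (· + p)) (q + p) =
      pvSweepGo ds' cs' dcum' ccum' cuts q := by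
  intro cuts
  induction cuts with
  | nil => intro _ q _; rfl
  | cons z t ih =>
    intro hz q hq
    simp only [List.map_cons, pvSweepGo]
    rw [hD q hq, hC q hq, ih (fun y hy => hz y (List.mem_cons_of_mem _ hy)) z (hz z (by simp)),
        show z + p - (q + p) = z - q from by omega]

-- the sweep when one of the two sides is empty
theorem pvSweepAll_nil_left (cs : List (Int × Int)) (hpos : ∀ x ∈ cs, 0 < x.2) :
    pvSweepAll [] cs = [] := by
  have hf : (pvCumB cs 0).filter (fun x => decide (x ≤ (0 : Int))) = [] := by
    rw [List.filter_eq_nil_iff]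
    intro y hy
    have := pvCumB_pos cs hpos y hy
    simp
    omega
  simp only [pvSweepAll, pvCumB, pvTotal_nil_left, List.nil_append]
  rw [hf]
  rfl

theorem pvSweepAll_nil_right (ds : List (Int × Int)) (hpos : ∀ x ∈ ds, 0 < x.2) :
    pvSweepAll ds [] = [] := by
  have hf : (pvCumB ds 0).filter (fun x => decide (x ≤ (0 : Int))) = [] := by
    rw [List.filter_eq_nil_iff]
    intro y hy
    have := pvCumB_pos ds hpos y hy
    simp
    omega
  simp only [pvSweepAll, pvCumB, pvTotal_nil_right, List.append_nil]
  rw [hf]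
  rfl

-- the big sweep finishes in one settlement when the smaller head reaches the common total
theorem sweepAll_last (d da c ca p : Int) (ds1 cs1 : List (Int × Int))
    (hdpos : ∀ x ∈ (d, da) :: ds1, 0 < x.2) (hcpos : ∀ x ∈ (c, ca) :: cs1, 0 < x.2)
    (hpda : p ≤ da) (hpca : p ≤ ca) (hor0 : p = da ∨ p = ca)
    (hEq : min (da + (ds1.map (·.2)).sum) (ca + (cs1.map (·.2)).sum) = p) :
    pvSweepAll ((d, da) :: ds1) ((c, ca) :: cs1) =
      [[("from_member_id", d), ("to_member_id", c), ("amount_cents", p)]] := by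
  have hd1 : ∀ x ∈ ds1, 0 < x.2 := fun z hz => hdpos z (List.mem_cons_of_mem _ hz)
  have hc1 : ∀ x ∈ cs1, 0 < x.2 := fun z hz => hcpos z (List.mem_cons_of_mem _ hz)
  have hdc0 : pvCumB ((d, da) :: ds1) 0 = da :: pvCumB ds1 da := by
    simp [pvCumB]
  have hcc0 : pvCumB ((c, ca) :: cs1) 0 = ca :: pvCumB cs1 ca := by
    simp [pvCumB]
  have hcuts : PySem.List.sorted (PySem.Set.ofList
      ((pvCumB ((d, da) :: ds1) 0 ++ pvCumB ((c, ca) :: cs1) 0).filter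
        (fun x => decide (x ≤ p)))) (fun x => x) = [p] := by
    apply cuts_char
    · simp
    · intro y
      simp only [List.mem_filter, List.mem_append, hdc0, hcc0,
        List.mem_cons, List.not_mem_nil, or_false, decide_eq_true_eq]
      constructor
      · rintro rfl
        refine ⟨?_, le_refl _⟩
        rcases hor0 with h | h
        · left; left; exact h
        · right; left; exact h
      · rintro ⟨hy, hyle⟩
        rcases hy with (rfl | hy) | (rfl | hy)
        · omega
        · have := pvCumB_gt ds1 hd1 da y hy; omega
        · omega
        · have := pvCumB_gt cs1 hc1 ca y hy; omega
  simp only [pvSweepAll]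
  rw [pvTotal_eq _ _ _ _ (pvCumB_getLast0 _ (List.cons_ne_nil _ _))
        (pvCumB_getLast0 _ (List.cons_ne_nil _ _)),
      List.map_cons, List.sum_cons, List.map_cons, List.sum_cons, hEq, hcuts]
  simp only [pvSweepGo, rank_zero _ hdpos, rank_zero _ hcpos, List.getD_cons_zero, sub_zero]

-- one step of the big sweep when the common total is not yet reached
theorem sweepAll_step (d da c ca p : Int) (ds1 cs1 : List (Int × Int))
    (hdpos : ∀ x ∈ (d, da) :: ds1, 0 < x.2) (hcpos : ∀ x ∈ (c, ca) :: cs1, 0 < x.2)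
    (hpda : p ≤ da) (hpca : p ≤ ca) (hor0 : p = da ∨ p = ca)
    (hLt : p < min (da + (ds1.map (·.2)).sum) (ca + (cs1.map (·.2)).sum)) :
    pvSweepAll ((d, da) :: ds1) ((c, ca) :: cs1) =
      [("from_member_id", d), ("to_member_id", c), ("amount_cents", p)] ::
      pvSweepAll (if da - p = 0 then ds1 else (d, da - p) :: ds1)
                 (if ca - p = 0 then cs1 else (c, ca - p) :: cs1) := by
  have hd1 : ∀ x ∈ ds1, 0 < x.2 := fun z hz => hdpos z (List.mem_cons_of_mem _ hz)
  have hc1 : ∀ x ∈ cs1, 0 < x.2 := fun z hz => hcpos z (List.mem_cons_of_mem _ hz)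
  have hS1 : 0 ≤ (ds1.map (·.2)).sum := (sum_pos_eq ds1 hd1).1
  have hT1 : 0 ≤ (cs1.map (·.2)).sum := (sum_pos_eq cs1 hc1).1
  have hpd : p < da + (ds1.map (·.2)).sum := lt_of_lt_of_le hLt (min_le_left _ _)
  have hpc : p < ca + (cs1.map (·.2)).sum := lt_of_lt_of_le hLt (min_le_right _ _)
  have hor : da - p = 0 ∨ ca - p = 0 := by omega
  have hdsNpos : ∀ x ∈ (if da - p = 0 then ds1 else (d, da - p) :: ds1), 0 < x.2 := by
    by_cases h : da - p = 0
    · rw [if_pos h]; exact hd1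
    · rw [if_neg h]
      intro x hx
      rcases List.mem_cons.mp hx with rfl | hx
      · simp; omega
      · exact hd1 x hx
  have hcsNpos : ∀ x ∈ (if ca - p = 0 then cs1 else (c, ca - p) :: cs1), 0 < x.2 := by
    by_cases h : ca - p = 0
    · rw [if_pos h]; exact hc1
    · rw [if_neg h]
      intro x hx
      rcases List.mem_cons.mp hx with rfl | hx
      · simp; omega
      · exact hc1 x hx
  have hsumN : ((if da - p = 0 then ds1 else (d, da - p) :: ds1).map (·.2)).sum
      = da + (ds1.map (·.2)).sum - p := by
    by_cases h : da - p = 0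
    · rw [if_pos h]; omega
    · rw [if_neg h, List.map_cons, List.sum_cons]; omega
  have hsumNc : ((if ca - p = 0 then cs1 else (c, ca - p) :: cs1).map (·.2)).sum
      = ca + (cs1.map (·.2)).sum - p := by
    by_cases h : ca - p = 0
    · rw [if_pos h]; omega
    · rw [if_neg h, List.map_cons, List.sum_cons]; omega
  have hdsNne : (if da - p = 0 then ds1 else (d, da - p) :: ds1) ≠ [] := by
    by_cases h : da - p = 0
    · rw [if_pos h]
      intro hnil
      have : (ds1.map (·.2)).sum = 0 := by rw [hnil]; simp
      omega
    · rw [if_neg h]; exact List.cons_ne_nil _ _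
  have hcsNne : (if ca - p = 0 then cs1 else (c, ca - p) :: cs1) ≠ [] := by
    by_cases h : ca - p = 0
    · rw [if_pos h]
      intro hnil
      have : (cs1.map (·.2)).sum = 0 := by rw [hnil]; simp
      omega
    · rw [if_neg h]; exact List.cons_ne_nil _ _
  have hD := rank_shift d da p ds1 hdpos hdsNpos
  have hC := rank_shift c ca p cs1 hcpos hcsNpos
  have hdcumB : pvCumB ((d, da) :: ds1) 0 =
      (if da - p = 0
        then p :: (pvCumB (if da - p = 0 then ds1 else (d, da - p) :: ds1) 0).map (· + p)
        else (pvCumB (if da - p = 0 then ds1 else (d, da - p) :: ds1) 0).map (· + p)) := by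
    by_cases h : da - p = 0
    · rw [cum_step d da p ds1, if_pos h, if_pos h, if_pos h]
    · rw [cum_step d da p ds1, if_neg h, if_neg h, if_neg h]
  have hccumB : pvCumB ((c, ca) :: cs1) 0 =
      (if ca - p = 0
        then p :: (pvCumB (if ca - p = 0 then cs1 else (c, ca - p) :: cs1) 0).map (· + p)
        else (pvCumB (if ca - p = 0 then cs1 else (c, ca - p) :: cs1) 0).map (· + p)) := by
    by_cases h : ca - p = 0
    · rw [cum_step c ca p cs1, if_pos h, if_pos h, if_pos h]
    · rw [cum_step c ca p cs1, if_neg h, if_neg h, if_neg h]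
  -- from here on the reduced lists are opaque
  generalize hG1 : (if da - p = 0 then ds1 else (d, da - p) :: ds1) = dsN
    at hdsNpos hsumN hdsNne hD hdcumB ⊢
  generalize hG2 : (if ca - p = 0 then cs1 else (c, ca - p) :: cs1) = csN
    at hcsNpos hsumNc hcsNne hC hccumB ⊢
  have hUnion : ∀ y : Int,
      (y ∈ pvCumB ((d, da) :: ds1) 0 ++ pvCumB ((c, ca) :: cs1) 0) ↔
        (y = p ∨ (y - p) ∈ pvCumB dsN 0 ++ pvCumB csN 0) := by
    intro y
    rw [List.mem_append, List.mem_append, hdcumB, hccumB]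
    by_cases h1 : da - p = 0 <;> by_cases h2 : ca - p = 0
    · rw [if_pos h1, if_pos h2]
      simp only [List.mem_cons, mem_map_add]
      tauto
    · rw [if_pos h1, if_neg h2]
      simp only [List.mem_cons, mem_map_add]
      tauto
    · rw [if_neg h1, if_pos h2]
      simp only [List.mem_cons, mem_map_add]
      tauto
    · exact absurd hor (by simp [h1, h2])
  have hCSpair : (PySem.List.sorted (PySem.Set.ofList
      ((pvCumB dsN 0 ++ pvCumB csN 0).filter
        (fun x => decide (x ≤ min (da + (ds1.map (·.2)).sum) (ca + (cs1.map (·.2)).sum) - p))))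
      (fun x => x)).Pairwise (· < ·) := PySem.List.sorted_ofList_pairwise_lt _
  have hCSmem : ∀ z : Int, z ∈ PySem.List.sorted (PySem.Set.ofList
      ((pvCumB dsN 0 ++ pvCumB csN 0).filter
        (fun x => decide (x ≤ min (da + (ds1.map (·.2)).sum) (ca + (cs1.map (·.2)).sum) - p))))
      (fun x => x) ↔ (z ∈ pvCumB dsN 0 ++ pvCumB csN 0 ∧
        z ≤ min (da + (ds1.map (·.2)).sum) (ca + (cs1.map (·.2)).sum) - p) := by
    intro z
    rw [PySem.List.mem_sorted, PySem.Set.mem_ofList, List.mem_filter]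
    simp
  have hCSpos : ∀ z ∈ PySem.List.sorted (PySem.Set.ofList
      ((pvCumB dsN 0 ++ pvCumB csN 0).filter
        (fun x => decide (x ≤ min (da + (ds1.map (·.2)).sum) (ca + (cs1.map (·.2)).sum) - p))))
      (fun x => x), 0 < z := by
    intro z hz
    rcases List.mem_append.mp ((hCSmem z).mp hz).1 with h | h
    · exact pvCumB_pos dsN hdsNpos z h
    · exact pvCumB_pos csN hcsNpos z h
  have hcutsB : PySem.List.sorted (PySem.Set.ofList
      ((pvCumB ((d, da) :: ds1) 0 ++ pvCumB ((c, ca) :: cs1) 0).filter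
        (fun x => decide (x ≤ min (da + (ds1.map (·.2)).sum) (ca + (cs1.map (·.2)).sum)))))
      (fun x => x) = p ::
        (PySem.List.sorted (PySem.Set.ofList
          ((pvCumB dsN 0 ++ pvCumB csN 0).filter
            (fun x => decide (x ≤ min (da + (ds1.map (·.2)).sum) (ca + (cs1.map (·.2)).sum) - p))))
          (fun x => x)).map (· + p) := by
    apply cuts_char
    · rw [List.pairwise_cons]
      constructor
      · intro y hy
        obtain ⟨z, hz, rfl⟩ := List.mem_map.mp hy
        have := hCSpos z hz
        omega
      · refine List.pairwise_map.mpr (hCSpair.imp ?_)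
        intro a b hab
        omega
    · intro y
      simp only [List.mem_cons, mem_map_add, List.mem_filter, decide_eq_true_eq]
      constructor
      · rintro (h | hy)
        · refine ⟨(hUnion y).mpr (Or.inl h), ?_⟩
          rw [h]
          exact le_of_lt hLt
        · have h2 := (hCSmem _).mp hy
          refine ⟨(hUnion y).mpr (Or.inr h2.1), ?_⟩
          have := h2.2
          linarith
      · rintro ⟨hy, hyM⟩
        rcases (hUnion y).mp hy with h | hy'
        · exact Or.inl h
        · refine Or.inr ((hCSmem _).mpr ⟨hy', ?_⟩)
          linarith
  simp only [pvSweepAll]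
  rw [pvTotal_eq _ _ _ _ (pvCumB_getLast0 _ (List.cons_ne_nil _ _))
        (pvCumB_getLast0 _ (List.cons_ne_nil _ _)),
      pvTotal_eq _ _ _ _ (pvCumB_getLast0 dsN hdsNne) (pvCumB_getLast0 csN hcsNne),
      List.map_cons, List.sum_cons, List.map_cons, List.sum_cons,
      hsumN, hsumNc, min_sub, hcutsB]
  simp only [pvSweepGo]
  rw [rank_zero _ hdpos, rank_zero _ hcpos]
  congr 1
  · simp
  · have hsh := sweep_shift ((d, da) :: ds1) ((c, ca) :: cs1) dsN csN
      (pvCumB ((d, da) :: ds1) 0) (pvCumB ((c, ca) :: cs1) 0) (pvCumB dsN 0) (pvCumB csN 0)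
      p hD hC
      (PySem.List.sorted (PySem.Set.ofList
        ((pvCumB dsN 0 ++ pvCumB csN 0).filter
          (fun x => decide (x ≤ min (da + (ds1.map (·.2)).sum) (ca + (cs1.map (·.2)).sum) - p))))
        (fun x => x)) (fun z hz => le_of_lt (hCSpos z hz)) 0 le_rfl
    rw [zero_add] at hsh
    exact hsh

-- MAIN: the two-pointer loop equals the prefix-sum sweep on positive-amount lists
theorem settle_eq_sweep : ∀ n (ds cs : List (Int × Int)), ds.length + cs.length ≤ n →
    (∀ x ∈ ds, 0 < x.2) → (∀ x ∈ cs, 0 < x.2) →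
    pvSettleA ds cs = pvSweepAll ds cs := by
  intro n
  induction n with
  | zero =>
    intro ds cs hlen _ hcpos
    have hds : ds = [] := by cases ds <;> simp_all
    have hcs : cs = [] := by cases cs <;> simp_all
    subst hds; subst hcs
    rw [pvSettleA_nil_left, pvSweepAll_nil_left _ hcpos]
  | succ n ih =>
    intro ds cs hlen hdpos hcpos
    match ds, cs with
    | [], cs => rw [pvSettleA_nil_left, pvSweepAll_nil_left _ hcpos]
    | (d, da) :: ds1, [] =>
      rw [pvSettleA_nil_right, pvSweepAll_nil_right _ hdpos]
    | (d, da) :: ds1, (c, ca) :: cs1 =>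
      have hd : 0 < da := hdpos (d, da) (by simp)
      have hc : 0 < ca := hcpos (c, ca) (by simp)
      have hd1 : ∀ x ∈ ds1, 0 < x.2 := fun z hz => hdpos z (List.mem_cons_of_mem _ hz)
      have hc1 : ∀ x ∈ cs1, 0 < x.2 := fun z hz => hcpos z (List.mem_cons_of_mem _ hz)
      have hS1 : 0 ≤ (ds1.map (·.2)).sum := (sum_pos_eq ds1 hd1).1
      have hT1 : 0 ≤ (cs1.map (·.2)).sum := (sum_pos_eq cs1 hc1).1
      have hpda : min da ca ≤ da := min_le_left da ca
      have hpca : min da ca ≤ ca := min_le_right da ca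
      have hp0 : 0 < min da ca := lt_min hd hc
      have hor0 : min da ca = da ∨ min da ca = ca := by
        rcases le_total da ca with h | h
        · left; exact min_eq_left h
        · right; exact min_eq_right h
      rw [pvSettleA_cons_eq]
      generalize hgen : min da ca = p at hpda hpca hp0 hor0 ⊢
      by_cases hEq : min (da + (ds1.map (·.2)).sum) (ca + (cs1.map (·.2)).sum) = p
      · rw [sweepAll_last d da c ca p ds1 cs1 hdpos hcpos hpda hpca hor0 hEq]
        have htail : pvSettleA
            (if da - p = 0 then ds1 else (d, da - p) :: ds1)
            (if ca - p = 0 then cs1 else (c, ca - p) :: cs1) = [] := by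
          rcases le_total (da + (ds1.map (·.2)).sum) (ca + (cs1.map (·.2)).sum) with hmle | hmle
          · have h1 : da + (ds1.map (·.2)).sum = p := by
              rw [← hEq, min_eq_left hmle]
            have hda0 : da - p = 0 := by omega
            have hnil : ds1 = [] := (sum_pos_eq ds1 hd1).2 (by omega)
            rw [if_pos hda0, hnil, pvSettleA_nil_left]
          · have h1 : ca + (cs1.map (·.2)).sum = p := by
              rw [← hEq, min_eq_right hmle]
            have hca0 : ca - p = 0 := by omega
            have hnil : cs1 = [] := (sum_pos_eq cs1 hc1).2 (by omega)
            rw [if_pos hca0, hnil, pvSettleA_nil_right]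
        rw [htail]
      · have hple : p ≤ min (da + (ds1.map (·.2)).sum) (ca + (cs1.map (·.2)).sum) :=
          le_min (by omega) (by omega)
        have hLt : p < min (da + (ds1.map (·.2)).sum) (ca + (cs1.map (·.2)).sum) :=
          lt_of_le_of_ne hple (fun h => hEq h.symm)
        rw [sweepAll_step d da c ca p ds1 cs1 hdpos hcpos hpda hpca hor0 hLt]
        congr 1
        have hdsNpos : ∀ x ∈ (if da - p = 0 then ds1 else (d, da - p) :: ds1), 0 < x.2 := by
          by_cases h : da - p = 0
          · rw [if_pos h]; exact hd1
          · rw [if_neg h]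
            intro x hx
            rcases List.mem_cons.mp hx with rfl | hx
            · simp; omega
            · exact hd1 x hx
        have hcsNpos : ∀ x ∈ (if ca - p = 0 then cs1 else (c, ca - p) :: cs1), 0 < x.2 := by
          by_cases h : ca - p = 0
          · rw [if_pos h]; exact hc1
          · rw [if_neg h]
            intro x hx
            rcases List.mem_cons.mp hx with rfl | hx
            · simp; omega
            · exact hc1 x hx
        have hor : da - p = 0 ∨ ca - p = 0 := by omega
        have hlenN : (if da - p = 0 then ds1 else (d, da - p) :: ds1).length +
            (if ca - p = 0 then cs1 else (c, ca - p) :: cs1).length ≤ n := by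
          simp only [List.length_cons] at hlen
          by_cases h1 : da - p = 0 <;> by_cases h2 : ca - p = 0 <;>
            simp only [h1, h2, if_true, if_false, List.length_cons]
          · omega
          · omega
          · omega
          · exact absurd hor (by simp [h1, h2])
        exact ih _ _ hlenN hdsNpos hcsNpos

-- ===== VERDICT (by name: the statement is the Claim_ definition above) =====
theorem simplify_settlements_spec : Claim_equal_simplify_settlements := by
  intro nb _
  unfold Spec_simplify_settlements simplify_settlements simplify_settlements_alt
  rw [pvSplitA_eq]
  have hd : ∀ x ∈ (((PySem.List.sorted2 (PySem.Dict.ofList nb).items Prod.fst Prod.snd false).filter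
      (fun p => decide (p.2 < 0))).map (fun p => (p.1, -p.2))), 0 < x.2 := by
    intro x hx
    simp only [List.mem_map, List.mem_filter] at hx
    obtain ⟨q, ⟨_, hq⟩, rfl⟩ := hx
    simp at hq ⊢; omega
  have hc : ∀ x ∈ ((PySem.List.sorted2 (PySem.Dict.ofList nb).items Prod.fst Prod.snd false).filter
      (fun p => decide (0 < p.2))), 0 < x.2 := by
    intro x hx
    simp only [List.mem_filter] at hx
    simpa using hx.2
  exact settle_eq_sweep _ _ _ le_rfl hd hc
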